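-- pv_equiv track=rewrite | github.com/road3144/Algorithm | math/pr_make_lv1.py | solution
-- ===== SOURCE A (Python) =====
-- def solution(nums):
--     answer = 0
--     n = len(nums)
--     data = [False, False] + [True] * 2999
--
--     for i in range(2, 3001):
--         if data[i]:
--             for j in range(2 * i, 3000, i):
--                 data[j] = False
--
--     for i in range(n):
--         for j in range(i + 1, n):
--             for k in range(j + 1, n):
--                 if i != j and j != k and i != k:
--                     tmp = nums[i] + nums[j] + nums[k]
--                     if data[tmp]:
--                         answer += 1
--     return answer
-- ===== SOURCE B (Python) =====
-- def _is_prime(m):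
--     if m < 2:
--         return False
--     d = 2
--     while d * d <= m:
--         if m % d == 0:
--             return False
--         d += 1
--     return True
--
--
-- def solution(nums):
--     # one pass: counters of suffix-free singles / pair sums / triple sums
--     singles = {}
--     pairs = {}
--     triples = {}
--     for x in nums:
--         for s, c in list(pairs.items()):
--             triples[s + x] = triples.get(s + x, 0) + c
--         for s, c in list(singles.items()):
--             pairs[s + x] = pairs.get(s + x, 0) + c
--         singles[x] = singles.get(x, 0) + 1
--     answer = 0
--     for s, c in triples.items():
--         if _is_prime(s):
--             answer += c
--     return answer
-- ===== Notes on version B (the rewrite author's own statement) =====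
-- stated objective: faster
-- what changed: B replaces A's three nested index loops (a sieve lookup per index triple) by a single left-to-right pass that maintains dict counters of 1-, 2- and 3-element suffix sums and finally sums the 3-sum counters whose key passes a trial-division primality test.
-- outside the precondition, e.g. on solution([1000, 1000, 1000]): A returns 1, B returns 0; on solution([-1, 0, 0]): A returns 1, B returns 0; on solution([2000, 2000, 2000]): A raises IndexError, B returns 0
import Mathlib
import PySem

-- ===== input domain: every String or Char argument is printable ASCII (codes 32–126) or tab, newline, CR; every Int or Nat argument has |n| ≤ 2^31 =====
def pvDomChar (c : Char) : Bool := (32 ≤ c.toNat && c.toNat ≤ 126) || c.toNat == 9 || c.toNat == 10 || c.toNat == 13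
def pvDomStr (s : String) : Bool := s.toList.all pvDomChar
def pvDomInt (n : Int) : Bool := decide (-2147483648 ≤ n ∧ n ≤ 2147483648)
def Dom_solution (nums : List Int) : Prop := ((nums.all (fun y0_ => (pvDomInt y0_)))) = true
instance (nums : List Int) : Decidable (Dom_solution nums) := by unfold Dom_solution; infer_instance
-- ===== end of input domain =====

-- B replaces A's cubic triple-index scan with one left-to-right pass maintaining dict counters of
-- 1-, 2- and 3-element sums over the prefix, plus a direct trial-division primality test.

-- ===== PORT A =====
-- A's sieve table, hoisted: A recomputes it on every call, its value is this constant
-- (slots 0..2999 sieved, slot 3000 initialised True and never revisited, exactly as in A).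
def sieveA : List Bool :=
  (PySem.List.pyRange 2 3001 1).foldl (fun d i =>
    if PySem.List.pyGetD d i false then
      (PySem.List.pyRange (2*i) 3000 i).foldl (fun d j => PySem.List.pySetD d j false) d
    else d)
    ([false, false] ++ List.replicate 2999 true)

def solution (nums : List Int) : Int :=
  let n : Int := PySem.List.len nums
  (PySem.List.pyRange 0 n 1).foldl (fun answer i =>
    (PySem.List.pyRange (i+1) n 1).foldl (fun answer j =>
      (PySem.List.pyRange (j+1) n 1).foldl (fun answer k =>
        if i ≠ j ∧ j ≠ k ∧ i ≠ k then
          -- data[tmp]: pyGetD is exact for in-range and negative (wraparound) indices;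
          -- tmp > 3000 (Python IndexError) lies outside Pre_solution
          if PySem.List.pyGetD sieveA
              (PySem.List.pyGetD nums i 0 + PySem.List.pyGetD nums j 0 + PySem.List.pyGetD nums k 0) false
          then answer + 1 else answer
        else answer) answer) answer) 0

-- ===== PORT B =====
-- Source B's 'while d * d <= m: d += 1' loop; fuel only bounds the recursion (the loop adds 1 to d
-- at most m times before d * d > m, so fuel m.toNat + 2 is never exhausted) — same values as the while loop.
def isPrimeAux (fuel : Nat) (m d : Int) : Bool :=
  match fuel with
  | 0 => true
  | fuel + 1 =>
    if d * d ≤ m then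
      (if PySem.Int.mod m d == 0 then false else isPrimeAux fuel m (d + 1))
    else true

def isPrimeB (m : Int) : Bool := if m < 2 then false else isPrimeAux (m.toNat + 2) m 2

def solution_alt (nums : List Int) : Int :=
  let st := nums.foldl
    (fun (st : PySem.Dict Int Int × PySem.Dict Int Int × PySem.Dict Int Int) x =>
      let triples := st.2.1.items.foldl (fun t (q : Int × Int) => t.modify (q.1 + x) 0 (· + q.2)) st.2.2
      let pairs := st.1.items.foldl (fun pr (q : Int × Int) => pr.modify (q.1 + x) 0 (· + q.2)) st.2.1
      let singles := st.1.modify x 0 (· + 1)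
      (singles, pairs, triples))
    (PySem.Dict.empty, PySem.Dict.empty, PySem.Dict.empty)
  st.2.2.items.foldl (fun answer (q : Int × Int) => if isPrimeB q.1 then answer + q.2 else answer) 0

-- ===== PRECONDITION & SPEC =====
-- spec-side reference lists: all sums nums[i]+nums[j] (i<j), resp. nums[i]+nums[j]+nums[k] (i<j<k)
def twoSums : List Int → List Int
  | [] => []
  | x :: xs => (xs.map (fun y => x + y)) ++ twoSums xs

def threeSums : List Int → List Int
  | [] => []
  | x :: xs => ((twoSums xs).map (fun y => x + y)) ++ threeSums xs

-- Pre_ admits exactly the lists whose three-element (index-increasing) sums all lie in [0, 2999]: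
-- for a sum above 3000 A raises IndexError; at exactly 3000 A reads the one table slot its sieve
-- bound range(2*i, 3000, i) never sieves, and on a negative sum A reads the table from the end via
-- Python's negative indexing — accidental table reads no caller would specify, so both are excluded.
def Pre_solution (nums : List Int) : Prop :=
  ∀ s ∈ threeSums nums, 0 ≤ s ∧ s ≤ 2999
instance (nums : List Int) : Decidable (Pre_solution nums) := by unfold Pre_solution; infer_instance

def pvWitness_solution : List Int := [2, 2, 3]

def Spec_solution (nums : List Int) (out : Int) : Prop := out = solution_alt nums
instance (nums : List Int) (out : Int) : Decidable (Spec_solution nums out) := by unfold Spec_solution; infer_instance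

-- ===== CLAIM (what is proved, stated in full; the proofs are below) =====
def Claim_equal_solution : Prop := ∀ (nums : List Int), Dom_solution nums → Pre_solution nums → Spec_solution nums (solution nums)

-- ===== LEMMAS AND PROOFS =====

-- the predicate A effectively tests on a triple sum
def pA (s : Int) : Bool := PySem.List.pyGetD sieveA s false

-- m has a divisor d with 2 ≤ d and 2*d ≤ m (for 2 ≤ m: m is composite)
def HasDiv (m : Nat) : Prop := ∃ d : Nat, 2 ≤ d ∧ d ∣ m ∧ 2 * d ≤ m

theorem markFold (L : List Int) (hL : ∀ j ∈ L, 0 ≤ j) (d : List Bool) (m : Nat) :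
    (L.foldl (fun d j => PySem.List.pySetD d j false) d).getD m false
      = if (m : Int) ∈ L ∧ m < d.length then false else d.getD m false := by
  induction L generalizing d with
  | nil => simp
  | cons j L ih =>
    have hj : 0 ≤ j := hL j (by simp)
    have hL' : ∀ j ∈ L, 0 ≤ j := fun j hjL => hL j (by simp [hjL])
    simp only [List.foldl_cons]
    rw [ih hL']
    have hset : PySem.List.pySetD d j false = d.set j.toNat false :=
      PySem.List.pySetD_of_nonneg d false hj
    rw [hset]
    simp only [List.length_set]
    have hget : (d.set j.toNat false).getD m false
        = if m = j.toNat ∧ m < d.length then false else d.getD m false := by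
      by_cases he : m = j.toNat
      · by_cases hlen : m < d.length
        · subst he; simp [List.getD_eq_getElem?_getD, hlen]
        · subst he
          simp [List.getD_eq_getElem?_getD, hlen]
      · simp [List.getD_eq_getElem?_getD, Ne.symm he, he]
    rw [hget]
    by_cases hmem : (m : Int) ∈ L
    · by_cases hlen : m < d.length
      · simp [hmem, hlen]
      · simp [hmem, hlen]
    · have hiff : ((m:Int) = j) ↔ (m = j.toNat) := by omega
      by_cases hlen : m < d.length
      · simp [hmem, hlen, hiff]
      · simp [hmem, hlen]

def SieveInv (I : Nat) (d : List Bool) : Prop :=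
  d.length = 3001 ∧
  ∀ m : Nat, m ≤ 3000 →
    (d.getD m false = true ↔
      (2 ≤ m ∧ ¬ ∃ i : Nat, 2 ≤ i ∧ i < I ∧ i ∣ m ∧ 2 * i ≤ m ∧ m < 3000))

theorem markFold_len (L : List Int) (d : List Bool) :
    (L.foldl (fun d j => PySem.List.pySetD d j false) d).length = d.length := by
  induction L generalizing d with
  | nil => rfl
  | cons j L ih => simp [ih, PySem.List.length_pySetD]

theorem sieveInv_init : SieveInv 2 ([false, false] ++ List.replicate 2999 true) := by
  have hcons : ([false, false] : List Bool) ++ List.replicate 2999 true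
      = false :: false :: List.replicate 2999 true := rfl
  constructor
  · rw [hcons]; simp only [List.length_cons, List.length_replicate]
  · intro m hm
    constructor
    · intro h
      refine ⟨?_, ?_⟩
      · rcases m with _ | m
        · rw [hcons] at h; simp only [List.getD_cons_zero] at h; cases h
        · rcases m with _ | m
          · rw [hcons] at h
            simp only [List.getD_cons_succ, List.getD_cons_zero] at h; cases h
          · omega
      · rintro ⟨i, h2, h3, -⟩; omega
    · rintro ⟨h2, -⟩
      rw [List.getD_eq_getElem?_getD, List.getElem?_append_right (by simp; omega)]
      rw [List.getElem?_replicate]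
      rw [if_pos (by simp; omega)]
      rfl

theorem sieveStep (I : Nat) (hI : 2 ≤ I) (hI2 : I ≤ 3000) (d : List Bool) (h : SieveInv I d) :
    SieveInv (I + 1)
      (if PySem.List.pyGetD d (I : Int) false then
        (PySem.List.pyRange (2*(I:Int)) 3000 (I:Int)).foldl (fun d j => PySem.List.pySetD d j false) d
      else d) := by
  obtain ⟨hlen, hchar⟩ := h
  have hIpos : (0:Int) < (I:Int) := by omega
  have hguard : PySem.List.pyGetD d (I:Int) false = d.getD I false := by
    simp [PySem.List.pyGetD_natCast]
  have hmem : ∀ m : Nat, ((m:Int) ∈ PySem.List.pyRange (2*(I:Int)) 3000 (I:Int))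
      ↔ (I ∣ m ∧ 2*I ≤ m ∧ m < 3000) := by
    intro m
    rw [PySem.List.mem_pyRange_iff_of_pos hIpos]
    constructor
    · rintro ⟨h1, h2, e, he⟩
      have he0 : 0 ≤ e := by
        by_contra he1
        have he3 : e ≤ -1 := by omega
        have he4 := mul_le_mul_of_nonneg_left he3 (le_of_lt hIpos)
        simp only [mul_neg_one] at he4
        omega
      have he2 : (m:Int) = (I:Int) * (e + 2) := by rw [mul_add]; omega
      refine ⟨⟨(e + 2).toNat, ?_⟩, by omega, by omega⟩
      have he5 : ((e + 2).toNat : Int) = e + 2 := by omega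
      have hgoal : (m : Int) = ((I * (e + 2).toNat : Nat) : Int) := by push_cast [he5]; omega
      exact_mod_cast hgoal
    · rintro ⟨⟨e, he⟩, h1, h2⟩
      refine ⟨by omega, by omega, (e:Int) - 2, ?_⟩
      have he6 : (m : Int) = (I:Int) * (e:Int) := by exact_mod_cast congrArg (Nat.cast (R := Int)) he
      rw [mul_sub]; omega
  have hext : ∀ m : Nat, (∃ i : Nat, 2 ≤ i ∧ i < I + 1 ∧ i ∣ m ∧ 2 * i ≤ m ∧ m < 3000)
      ↔ ((∃ i : Nat, 2 ≤ i ∧ i < I ∧ i ∣ m ∧ 2 * i ≤ m ∧ m < 3000) ∨ (I ∣ m ∧ 2*I ≤ m ∧ m < 3000)) := by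
    intro m
    constructor
    · rintro ⟨i, h1, h2, h3, h4, h5⟩
      rcases Nat.lt_or_ge i I with hi | hi
      · exact Or.inl ⟨i, h1, hi, h3, h4, h5⟩
      · have hiI : i = I := by omega
        subst hiI; exact Or.inr ⟨h3, h4, h5⟩
    · rintro (⟨i, h1, h2, h3, h4, h5⟩ | ⟨h3, h4, h5⟩)
      · exact ⟨i, h1, by omega, h3, h4, h5⟩
      · exact ⟨I, hI, by omega, h3, h4, h5⟩
  rw [hguard]
  by_cases hg : d.getD I false = true
  · rw [if_pos hg]
    refine ⟨by rw [markFold_len, hlen], ?_⟩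
    intro m hm
    rw [markFold _ (by intro j hj; rw [PySem.List.mem_pyRange_iff_of_pos hIpos] at hj; omega) d m]
    by_cases hmk : I ∣ m ∧ 2*I ≤ m ∧ m < 3000
    · rw [if_pos ⟨(hmem m).mpr hmk, by omega⟩]
      apply iff_of_false (by simp)
      rintro ⟨-, hno⟩
      exact hno ((hext m).mpr (Or.inr hmk))
    · rw [if_neg (fun hc => hmk ((hmem m).mp hc.1)), hchar m hm]
      constructor
      · rintro ⟨h2, hno⟩
        refine ⟨h2, fun hex => ?_⟩
        rcases (hext m).mp hex with h | h
        · exact hno h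
        · exact hmk h
      · rintro ⟨h2, hno⟩
        exact ⟨h2, fun hex => hno ((hext m).mpr (Or.inl hex))⟩
  · rw [if_neg hg]
    have hIc : ∃ i : Nat, 2 ≤ i ∧ i < I ∧ i ∣ I ∧ 2 * i ≤ I ∧ I < 3000 := by
      have h2 := (hchar I (by omega))
      by_contra hno
      exact hg (h2.mpr ⟨hI, hno⟩)
    obtain ⟨i0, hi1, hi2, hi3, hi4, hi5⟩ := hIc
    refine ⟨hlen, ?_⟩
    intro m hm
    rw [hchar m hm]
    constructor
    · rintro ⟨h2, hno⟩
      refine ⟨h2, fun hex => ?_⟩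
      rcases (hext m).mp hex with h | h
      · exact hno h
      · exact hno ⟨i0, hi1, hi2, dvd_trans hi3 h.1, by omega, h.2.2⟩
    · rintro ⟨h2, hno⟩
      exact ⟨h2, fun hex => hno ((hext m).mpr (Or.inl hex))⟩

theorem sieveLoop : ∀ (n I : Nat) (d : List Bool), I + n = 3001 → 2 ≤ I → SieveInv I d →
    SieveInv 3001 ((PySem.List.pyRange (I : Int) 3001 1).foldl (fun d i =>
      if PySem.List.pyGetD d i false then
        (PySem.List.pyRange (2*i) 3000 i).foldl (fun d j => PySem.List.pySetD d j false) d
      else d) d) := by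
  intro n
  induction n with
  | zero =>
    intro I d hIn hI hinv
    have hI3 : I = 3001 := by omega
    subst hI3
    rw [PySem.List.pyRange_one_eq_nil (by omega)]
    simpa using hinv
  | succ n ih =>
    intro I d hIn hI hinv
    rw [PySem.List.pyRange_one_cons (by omega), List.foldl_cons]
    have hcast : ((I:Int) + 1) = ((I + 1 : Nat) : Int) := by push_cast; ring
    rw [hcast]
    exact ih (I+1) _ (by omega) (by omega) (sieveStep I hI (by omega) d hinv)
theorem sieveA_inv : SieveInv 3001 sieveA := by
  have h := sieveLoop 2999 2 ([false, false] ++ List.replicate 2999 true) (by omega) (by omega)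
    sieveInv_init
  have hc : ((2 : Nat) : Int) = (2 : Int) := by norm_num
  rw [hc] at h
  exact h

theorem sieveA_char (m : Nat) (hm : m ≤ 2999) :
    (sieveA.getD m false = true ↔ (2 ≤ m ∧ ¬ HasDiv m)) := by
  obtain ⟨-, hchar⟩ := sieveA_inv
  rw [hchar m (by omega)]
  unfold HasDiv
  constructor
  · rintro ⟨h2, hno⟩
    refine ⟨h2, fun ⟨d, hd1, hd2, hd3⟩ => hno ⟨d, hd1, by omega, hd2, hd3, by omega⟩⟩
  · rintro ⟨h2, hno⟩
    exact ⟨h2, fun ⟨d, hd1, _, hd2, hd3, _⟩ => hno ⟨d, hd1, hd2, hd3⟩⟩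

theorem isPrimeAux_false_iff (m : Int) : ∀ (fuel : Nat) (d : Int), 2 ≤ d → (m + 1 - d).toNat < fuel →
    (isPrimeAux fuel m d = false ↔ ∃ e : Int, d ≤ e ∧ e * e ≤ m ∧ PySem.Int.mod m e = 0) := by
  intro fuel
  induction fuel with
  | zero => intro d hd ht; omega
  | succ fuel ih =>
    intro d hd ht
    rw [isPrimeAux]
    by_cases h : d * d ≤ m
    · rw [if_pos h]
      by_cases hmod : PySem.Int.mod m d == 0
      · rw [if_pos hmod]
        constructor
        · intro _
          exact ⟨d, le_refl d, h, by simpa using hmod⟩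
        · intro _; rfl
      · rw [if_neg hmod]
        have hdm : d ≤ m := by
          have h1 : d * 1 ≤ d * d := by
            apply mul_le_mul_of_nonneg_left _ (by omega)
            omega
          simp at h1; omega
        rw [ih (d+1) (by omega) (by omega)]
        constructor
        · rintro ⟨e, he1, he2, he3⟩
          exact ⟨e, by omega, he2, he3⟩
        · rintro ⟨e, he1, he2, he3⟩
          refine ⟨e, ?_, he2, he3⟩
          rcases eq_or_lt_of_le he1 with heq | hlt
          · exfalso; subst heq; simp at hmod; exact hmod he3
          · omega
    · rw [if_neg h]
      simp only [Bool.true_eq_false, false_iff]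
      rintro ⟨e, he1, he2, -⟩
      have : d * d ≤ e * e := by
        apply mul_le_mul he1 he1 (by omega)
        omega
      omega

theorem hasDiv_iff_sq (m : Nat) : HasDiv m ↔ ∃ d : Nat, 2 ≤ d ∧ d ∣ m ∧ d * d ≤ m := by
  constructor
  · rintro ⟨d, hd1, hd2, hd3⟩
    have hdpos : 0 < d := by omega
    have hq2 : 2 ≤ m / d := (Nat.le_div_iff_mul_le hdpos).mpr (by omega)
    have hqd : m / d ∣ m := Nat.div_dvd_of_dvd hd2
    have hme : m = d * (m / d) := (Nat.div_mul_cancel hd2).symm.trans (Nat.mul_comm _ _)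
    rcases Nat.le_total d (m / d) with hle | hle
    · exact ⟨d, hd1, hd2, by calc d * d ≤ d * (m / d) := Nat.mul_le_mul_left d hle
        _ = m := hme.symm⟩
    · refine ⟨m / d, hq2, hqd, ?_⟩
      calc (m / d) * (m / d) ≤ d * (m / d) := Nat.mul_le_mul_right _ hle
        _ = m := hme.symm
  · rintro ⟨d, hd1, hd2, hd3⟩
    refine ⟨d, hd1, hd2, by nlinarith⟩

theorem isPrimeB_char (m : Nat) :
    (isPrimeB (m : Int) = true ↔ (2 ≤ m ∧ ¬ HasDiv m)) := by
  unfold isPrimeB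
  by_cases hm : m < 2
  · rw [if_pos (by exact_mod_cast hm)]
    simp only [Bool.false_eq_true, false_iff]
    intro h; omega
  · rw [if_neg (by omega)]
    rw [show (isPrimeAux ((m:Int).toNat + 2) (m:Int) 2 = true) ↔ ¬ (isPrimeAux ((m:Int).toNat + 2) (m:Int) 2 = false) by
      constructor
      · intro h h2; rw [h] at h2; cases h2
      · intro h; cases hx : isPrimeAux ((m:Int).toNat + 2) (m:Int) 2
        · exact absurd hx h
        · rfl]
    rw [isPrimeAux_false_iff (m:Int) ((m:Int).toNat + 2) 2 (by omega) (by omega)]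
    constructor
    · intro h
      refine ⟨by omega, fun hdv => h ?_⟩
      rcases (hasDiv_iff_sq m).mp hdv with ⟨d, hd1, hd2, hd3⟩
      refine ⟨(d : Int), by omega, by exact_mod_cast hd3, ?_⟩
      rw [PySem.Int.mod_eq_zero_iff_dvd]
      exact_mod_cast hd2
    · rintro ⟨h2, hno⟩ ⟨e, he1, he2, he3⟩
      rw [PySem.Int.mod_eq_zero_iff_dvd] at he3
      apply hno
      rw [hasDiv_iff_sq m]
      refine ⟨e.toNat, by omega, ?_, ?_⟩
      · have : (e.toNat : Int) ∣ (m : Int) := by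
          rwa [show ((e.toNat : Int)) = e by omega]
        exact_mod_cast this
      · have : ((e.toNat * e.toNat : Nat) : Int) ≤ (m : Int) := by
          push_cast
          rw [show ((e.toNat : Int)) = e by omega]
          exact he2
        exact_mod_cast this

theorem bridge (s : Int) (h0 : 0 ≤ s) (h1 : s ≤ 2999) : pA s = isPrimeB s := by
  have hs : s = ((s.toNat : Nat) : Int) := by omega
  rw [hs]
  unfold pA
  rw [PySem.List.pyGetD_natCast]
  have h2 := sieveA_char s.toNat (by omega)
  have h3 := isPrimeB_char s.toNat
  cases hx : sieveA.getD s.toNat false <;> cases hy : isPrimeB ((s.toNat : Nat) : Int)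
  · rfl
  · rw [hx] at h2
    exact absurd (h2.mpr (h3.mp hy)) Bool.false_ne_true
  · rw [hy] at h3
    exact absurd (h3.mpr (h2.mp hx)) Bool.false_ne_true
  · rfl

theorem count_map_add (l : List Int) (a v : Int) :
    (l.map (fun y => a + y)).count v = l.count (v - a) := by
  induction l with
  | nil => rfl
  | cons y l ih =>
    simp only [List.map_cons, List.count_cons, ih]
    congr 1
    by_cases h : a + y = v <;> simp_all <;> omega
theorem twoSums_append (l : List Int) (x v : Int) :
    (twoSums (l ++ [x])).count v = (twoSums l).count v + l.count (v - x) := by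
  induction l with
  | nil => simp [twoSums]
  | cons y l ih =>
    simp only [List.cons_append, twoSums, List.count_append, ih, List.map_append,
      List.map_cons, List.map_nil, count_map_add, List.count_cons]
    have h1 : (v - y - x = v - x - y) := by omega
    by_cases h : x + y = v
    · have h2 : y = v - x := by omega
      have h3 : y + x = v := by omega
      simp [h2]
      omega
    · have h2 : ¬ (y = v - x) := by omega
      have h3 : ¬ (y + x = v) := by omega
      simp [h2, h3]
      omega
theorem threeSums_append (l : List Int) (x v : Int) :
    (threeSums (l ++ [x])).count v = (threeSums l).count v + (twoSums l).count (v - x) := by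
  induction l with
  | nil => simp [threeSums, twoSums]
  | cons y l ih =>
    simp only [List.cons_append, threeSums, List.count_append, ih, count_map_add,
      twoSums, twoSums_append]
    have h1 : v - y - x = v - x - y := by omega
    rw [h1]
    omega

theorem lemA1 (xs : List Int) (q : Int → Bool) : ∀ (t m : Nat) (a : Int), xs.length - m = t →
    (PySem.List.pyRange (m : Int) xs.length 1).foldl
      (fun a k => if q (PySem.List.pyGetD xs k 0) then a + 1 else a) a
      = a + ((xs.drop m).countP q : Int) := by
  intro t
  induction t with
  | zero =>
    intro m a ht
    rw [PySem.List.pyRange_one_eq_nil (by omega), List.drop_eq_nil_of_le (by omega)]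
    simp
  | succ t ih =>
    intro m a ht
    have hm : m < xs.length := by omega
    rw [PySem.List.pyRange_one_cons (by exact_mod_cast hm), List.foldl_cons]
    rw [show ((m:Int) + 1) = ((m + 1 : Nat) : Int) by push_cast; ring]
    rw [ih (m+1) _ (by omega)]
    rw [List.drop_eq_getElem_cons hm, List.countP_cons]
    have hg : PySem.List.pyGetD xs (m:Int) 0 = xs[m] := by
      rw [PySem.List.pyGetD_natCast, List.getD_eq_getElem?_getD, List.getElem?_eq_getElem hm]
      rfl
    rw [hg]
    by_cases hq : q xs[m]
    · simp [hq]
      omega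
    · simp [hq]

theorem lemA2 (xs : List Int) (p : Int → Bool) (B : Int) : ∀ (t m : Nat) (a : Int), xs.length - m = t →
    (PySem.List.pyRange (m : Int) xs.length 1).foldl
      (fun a j => (PySem.List.pyRange (j+1) xs.length 1).foldl
        (fun a k => if p (B + PySem.List.pyGetD xs j 0 + PySem.List.pyGetD xs k 0) then a + 1 else a) a) a
      = a + (((twoSums (xs.drop m)).countP (fun s => p (B + s))) : Int) := by
  intro t
  induction t with
  | zero =>
    intro m a ht
    rw [PySem.List.pyRange_one_eq_nil (by omega), List.drop_eq_nil_of_le (by omega)]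
    simp [twoSums]
  | succ t ih =>
    intro m a ht
    have hm : m < xs.length := by omega
    rw [PySem.List.pyRange_one_cons (by exact_mod_cast hm), List.foldl_cons]
    rw [show ((m:Int) + 1) = ((m + 1 : Nat) : Int) by push_cast; ring]
    rw [ih (m+1) _ (by omega)]
    have hg : PySem.List.pyGetD xs (m:Int) 0 = xs[m] := by
      rw [PySem.List.pyGetD_natCast, List.getD_eq_getElem?_getD, List.getElem?_eq_getElem hm]
      rfl
    conv_lhs => rw [lemA1 xs (fun z => p (B + PySem.List.pyGetD xs (m:Int) 0 + z)) (xs.length - (m+1)) (m+1) a rfl]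
    rw [List.drop_eq_getElem_cons hm]
    simp only [twoSums, List.countP_append, List.countP_map]
    rw [hg]
    have hcong : (xs.drop (m+1)).countP ((fun s => p (B + s)) ∘ (fun y => xs[m] + y))
        = (xs.drop (m+1)).countP (fun z => p (B + xs[m] + z)) := by
      apply List.countP_congr
      intro z hz
      simp only [Function.comp]
      rw [show B + (xs[m] + z) = B + xs[m] + z by ring]
    rw [hcong]
    push_cast
    ring

theorem lemA3 (xs : List Int) (p : Int → Bool) : ∀ (t m : Nat) (a : Int), xs.length - m = t →
    (PySem.List.pyRange (m : Int) xs.length 1).foldl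
      (fun a i => (PySem.List.pyRange (i+1) xs.length 1).foldl
        (fun a j => (PySem.List.pyRange (j+1) xs.length 1).foldl
          (fun a k => if p (PySem.List.pyGetD xs i 0 + PySem.List.pyGetD xs j 0 + PySem.List.pyGetD xs k 0) then a + 1 else a) a) a) a
      = a + (((threeSums (xs.drop m)).countP p) : Int) := by
  intro t
  induction t with
  | zero =>
    intro m a ht
    rw [PySem.List.pyRange_one_eq_nil (by omega), List.drop_eq_nil_of_le (by omega)]
    simp [threeSums]
  | succ t ih =>
    intro m a ht
    have hm : m < xs.length := by omega
    rw [PySem.List.pyRange_one_cons (by exact_mod_cast hm), List.foldl_cons]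
    rw [show ((m:Int) + 1) = ((m + 1 : Nat) : Int) by push_cast; ring]
    rw [ih (m+1) _ (by omega)]
    have hg : PySem.List.pyGetD xs (m:Int) 0 = xs[m] := by
      rw [PySem.List.pyGetD_natCast, List.getD_eq_getElem?_getD, List.getElem?_eq_getElem hm]
      rfl
    conv_lhs => rw [lemA2 xs p (PySem.List.pyGetD xs (m:Int) 0) (xs.length - (m+1)) (m+1) a rfl]
    rw [List.drop_eq_getElem_cons hm]
    simp only [threeSums, List.countP_append, List.countP_map]
    rw [hg]
    have hcong : (twoSums (xs.drop (m+1))).countP (p ∘ (fun y => xs[m] + y))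
        = (twoSums (xs.drop (m+1))).countP (fun s => p (xs[m] + s)) := by
      apply List.countP_congr
      intro z hz
      simp [Function.comp]
    rw [hcong]
    push_cast
    ring

theorem solution_eq_countP (nums : List Int) :
    solution nums = ((threeSums nums).countP pA : Int) := by
  have hgoal : solution nums
      = (PySem.List.pyRange 0 (nums.length:Int) 1).foldl (fun answer i =>
      (PySem.List.pyRange (i+1) (nums.length:Int) 1).foldl (fun answer j =>
        (PySem.List.pyRange (j+1) (nums.length:Int) 1).foldl (fun answer k =>
          if pA (PySem.List.pyGetD nums i 0 + PySem.List.pyGetD nums j 0 + PySem.List.pyGetD nums k 0)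
          then answer + 1 else answer) answer) answer) 0 := by
    unfold solution
    simp only [PySem.List.len_eq]
    apply PySem.List.foldl_congr_mem
    intro acc i hi
    apply PySem.List.foldl_congr_mem
    intro acc2 j hj
    apply PySem.List.foldl_congr_mem
    intro acc3 k hk
    rw [PySem.List.mem_pyRange_one] at hj hk
    rw [if_pos ⟨by omega, by omega, by omega⟩]
    rfl
  rw [hgoal]
  have h3 := lemA3 nums pA nums.length 0 0 (by omega)
  rw [show ((0:Nat):Int) = (0:Int) by norm_num] at h3
  rw [h3, List.drop_zero]
  ring

theorem filterMapSum (L : List (Int × Int)) (k : Int) (h : (L.map (·.1)).Nodup) :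
    ((L.filter (fun q => q.1 == k)).map (·.2)).sum
      = ((L.find? (fun q => q.1 == k)).map (·.2)).getD 0 := by
  induction L with
  | nil => rfl
  | cons q L ih =>
    simp only [List.map_cons, List.nodup_cons] at h
    by_cases hq : q.1 = k
    · have hfil : L.filter (fun q => q.1 == k) = [] := by
        rw [List.filter_eq_nil_iff]
        intro q' hq' hq'k
        apply h.1
        rw [show q.1 = q'.1 by simp at hq'k; omega]
        exact List.mem_map_of_mem hq'
      rw [List.filter_cons_of_pos (by simpa using hq), List.find?_cons_of_pos (by simpa using hq)]
      rw [hfil]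
      simp
    · rw [List.filter_cons_of_neg (by simpa using hq), List.find?_cons_of_neg (by simpa using hq)]
      exact ih h.2

theorem assocFilterSum (d : PySem.Dict Int Int) (k : Int) (hnd : d.keys.Nodup) :
    ((d.items.filter (fun q => q.1 == k)).map (·.2)).sum = d.getD k 0 := by
  rw [filterMapSum d.items k hnd]
  rfl

theorem foldModifyAdd (L : List (Int × Int)) (x v : Int) : ∀ (t : PySem.Dict Int Int),
    ((L.foldl (fun t (q : Int × Int) => t.modify (q.1 + x) 0 (· + q.2)) t).getD v 0)
      = t.getD v 0 + ((L.filter (fun q => q.1 == v - x)).map (·.2)).sum := by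
  induction L with
  | nil => simp
  | cons q L ih =>
    intro t
    simp only [List.foldl_cons, ih, List.filter_cons]
    rw [PySem.Dict.getD_modify]
    by_cases h : q.1 = v - x
    · have hv : v = q.1 + x := by omega
      simp [h]
      ring
    · have hv : ¬ (v = q.1 + x) := by omega
      simp [h, hv]

def BInv (done : List Int) (S P T : PySem.Dict Int Int) : Prop :=
  S.keys.Nodup ∧ P.keys.Nodup ∧ T.keys.Nodup ∧
  (∀ v, S.getD v 0 = (done.count v : Int)) ∧
  (∀ v, P.getD v 0 = ((twoSums done).count v : Int)) ∧
  (∀ v, T.getD v 0 = ((threeSums done).count v : Int)) ∧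
  (∀ v, v ∈ S.keys ↔ v ∈ done) ∧
  (∀ v, v ∈ P.keys ↔ v ∈ twoSums done) ∧
  (∀ v, v ∈ T.keys ↔ v ∈ threeSums done)

theorem keys_foldAdd (D : PySem.Dict Int Int) (L : List (Int × Int)) (x : Int) :
    (L.foldl (fun t (q : Int × Int) => t.modify (q.1 + x) 0 (· + q.2)) D).keys
      = PySem.Set.update D.keys (L.map (fun q => q.1 + x)) :=
  PySem.Dict.keys_foldl_modify_key L (fun q => q.1 + x) 0 (fun _ q => (· + q.2)) D

theorem nodup_keys_foldAdd (D : PySem.Dict Int Int) (L : List (Int × Int)) (x : Int)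
    (h : D.keys.Nodup) :
    (L.foldl (fun t (q : Int × Int) => t.modify (q.1 + x) 0 (· + q.2)) D).keys.Nodup :=
  PySem.Dict.nodup_keys_foldl_modify_key L (fun q => q.1 + x) 0 (fun _ q => (· + q.2)) D h

theorem bStep (done : List Int) (S P T : PySem.Dict Int Int) (x : Int) (h : BInv done S P T) :
    BInv (done ++ [x])
      (S.modify x 0 (· + 1))
      (S.items.foldl (fun pr (q : Int × Int) => pr.modify (q.1 + x) 0 (· + q.2)) P)
      (P.items.foldl (fun t (q : Int × Int) => t.modify (q.1 + x) 0 (· + q.2)) T) := by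
  obtain ⟨nS, nP, nT, cS, cP, cT, kS, kP, kT⟩ := h
  have hSkeys : (S.modify x 0 (· + 1)).keys = (S.insert x (S.getD x 0 + 1)).keys :=
    PySem.Dict.keys_modify S x 0 (· + 1)
  refine ⟨?_, ?_, ?_, ?_, ?_, ?_, ?_, ?_, ?_⟩
  · rw [hSkeys]; exact PySem.Dict.nodup_keys_insert _ _ _ nS
  · exact nodup_keys_foldAdd P S.items x nP
  · exact nodup_keys_foldAdd T P.items x nT
  · intro v
    rw [PySem.Dict.getD_modify, List.count_append]
    by_cases hv : v = x
    · rw [if_pos hv, hv, cS x]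
      have hcx : List.count x [x] = 1 := by simp
      rw [hcx]
      push_cast; ring
    · have hcx : List.count v [x] = 0 := by
        simp only [List.count_singleton]
        simp [Ne.symm hv]
      rw [if_neg hv, cS v, hcx]
      push_cast; ring
  · intro v
    rw [foldModifyAdd, assocFilterSum S (v - x) nS, twoSums_append, cP v, cS (v - x)]
    push_cast; ring
  · intro v
    rw [foldModifyAdd, assocFilterSum P (v - x) nP, threeSums_append, cT v, cP (v - x)]
    push_cast; ring
  · intro v
    rw [hSkeys]
    rw [PySem.Dict.mem_keys_insert]
    rw [kS v]
    simp [or_comm]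
  · intro v
    rw [keys_foldAdd, PySem.Set.mem_update]
    rw [kP v]
    have hmap : (v ∈ S.items.map (fun q => q.1 + x)) ↔ (v - x) ∈ done := by
      rw [← kS (v - x)]
      constructor
      · rintro hv
        obtain ⟨q, hq, hqe⟩ := List.mem_map.mp hv
        have : q.1 = v - x := by omega
        rw [← this]
        exact List.mem_map_of_mem hq
      · intro hv
        obtain ⟨q, hq, hqe⟩ := List.mem_map.mp hv
        refine List.mem_map.mpr ⟨q, hq, by omega⟩
    rw [hmap]
    have h1 : v ∈ twoSums (done ++ [x]) ↔ 0 < (twoSums (done ++ [x])).count v := List.count_pos_iff.symm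
    have h2 : v ∈ twoSums done ↔ 0 < (twoSums done).count v := List.count_pos_iff.symm
    have h3 : (v - x) ∈ done ↔ 0 < done.count (v - x) := List.count_pos_iff.symm
    rw [h1, h2, h3, twoSums_append]
    omega
  · intro v
    rw [keys_foldAdd, PySem.Set.mem_update]
    rw [kT v]
    have hmap : (v ∈ P.items.map (fun q => q.1 + x)) ↔ (v - x) ∈ twoSums done := by
      rw [← kP (v - x)]
      constructor
      · rintro hv
        obtain ⟨q, hq, hqe⟩ := List.mem_map.mp hv
        have : q.1 = v - x := by omega
        rw [← this]
        exact List.mem_map_of_mem hq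
      · intro hv
        obtain ⟨q, hq, hqe⟩ := List.mem_map.mp hv
        refine List.mem_map.mpr ⟨q, hq, by omega⟩
    rw [hmap]
    have h1 : v ∈ threeSums (done ++ [x]) ↔ 0 < (threeSums (done ++ [x])).count v := List.count_pos_iff.symm
    have h2 : v ∈ threeSums done ↔ 0 < (threeSums done).count v := List.count_pos_iff.symm
    have h3 : (v - x) ∈ twoSums done ↔ 0 < (twoSums done).count (v - x) := List.count_pos_iff.symm
    rw [h1, h2, h3, threeSums_append]
    omega

def bStepFn (st : PySem.Dict Int Int × PySem.Dict Int Int × PySem.Dict Int Int) (x : Int) :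
    PySem.Dict Int Int × PySem.Dict Int Int × PySem.Dict Int Int :=
  (st.1.modify x 0 (· + 1),
   st.1.items.foldl (fun pr (q : Int × Int) => pr.modify (q.1 + x) 0 (· + q.2)) st.2.1,
   st.2.1.items.foldl (fun t (q : Int × Int) => t.modify (q.1 + x) 0 (· + q.2)) st.2.2)

theorem bLoop : ∀ (rest done : List Int) (S P T : PySem.Dict Int Int), BInv done S P T →
    BInv (done ++ rest)
      (rest.foldl bStepFn (S, P, T)).1
      (rest.foldl bStepFn (S, P, T)).2.1
      (rest.foldl bStepFn (S, P, T)).2.2 := by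
  intro rest
  induction rest with
  | nil =>
    intro done S P T h
    simpa using h
  | cons x rest ih =>
    intro done S P T h
    simp only [List.foldl_cons]
    have h2 := ih (done ++ [x]) (bStepFn (S, P, T) x).1 (bStepFn (S, P, T) x).2.1
      (bStepFn (S, P, T) x).2.2 (bStep done S P T x h)
    rw [List.append_assoc, List.singleton_append] at h2
    simpa using h2

theorem sumKeys : ∀ (K : List Int), ∀ (TS : List Int) (p : Int → Bool) (a : Int), K.Nodup →
    (∀ v ∈ TS, v ∈ K) →
    K.foldl (fun a k => if p k then a + (TS.count k : Int) else a) a = a + (TS.countP p : Int) := by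
  intro K
  induction K with
  | nil =>
    intro TS p a _ hsub
    have : TS = [] := List.eq_nil_iff_forall_not_mem.mpr (fun v hv => by simpa using hsub v hv)
    subst this
    simp
  | cons k K ih =>
    intro TS p a hnd hsub
    simp only [List.nodup_cons] at hnd
    simp only [List.foldl_cons]
    have hsub' : ∀ v ∈ TS.filter (fun v => !(v == k)), v ∈ K := by
      intro v hv
      rw [List.mem_filter] at hv
      rcases List.mem_cons.mp (hsub v hv.1) with h | h
      · exact absurd h (by simpa using hv.2)
      · exact h
    have hcong : K.foldl (fun a k' => if p k' then a + (TS.count k' : Int) else a)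
          (if p k then a + (TS.count k : Int) else a)
        = K.foldl (fun a k' => if p k' then a + ((TS.filter (fun v => !(v == k))).count k' : Int) else a)
          (if p k then a + (TS.count k : Int) else a) := by
      apply PySem.List.foldl_congr_mem
      intro acc k' hk'
      have hne : ¬ (k' == k) = true := by
        simp only [beq_iff_eq]
        intro he; subst he; exact hnd.1 hk'
      rw [List.count_filter (by simpa using hne)]
    rw [hcong, ih _ p _ hnd.2 hsub']
    have hperm : (TS.filter (fun v => v == k) ++ TS.filter (fun v => !(v == k))).Perm TS :=
      List.filter_append_perm _ TS
    have hsplit : TS.countP p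
        = (TS.filter (fun v => v == k)).countP p + (TS.filter (fun v => !(v == k))).countP p := by
      rw [← List.countP_append]
      exact (hperm.countP_eq p).symm
    have heqk : (TS.filter (fun v => v == k)).countP p = if p k then TS.count k else 0 := by
      rw [List.countP_filter]
      by_cases hp : p k
      · rw [if_pos hp]
        have : TS.countP (fun a => p a && a == k) = TS.countP (fun a => a == k) := by
          apply List.countP_congr
          intro a ha
          constructor
          · intro h
            simp only [Bool.and_eq_true] at h
            exact h.2
          · intro h
            have ha : a = k := by simpa using h
            subst ha
            simp [hp]
        rw [this]
        rfl
      · rw [if_neg hp]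
        apply List.countP_eq_zero.mpr
        intro a ha hx
        simp only [Bool.and_eq_true] at hx
        have h2 : a = k := by simpa using hx.2
        subst h2
        exact hp hx.1
    rw [hsplit, heqk]
    by_cases hp : p k
    · rw [if_pos hp, if_pos hp]
      push_cast; ring
    · rw [if_neg hp, if_neg hp]
      push_cast; ring

theorem solution_alt_eq_countP (nums : List Int) :
    solution_alt nums = ((threeSums nums).countP isPrimeB : Int) := by
  have hinit : BInv [] PySem.Dict.empty PySem.Dict.empty PySem.Dict.empty := by
    refine ⟨?_, ?_, ?_, ?_, ?_, ?_, ?_, ?_, ?_⟩ <;>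
      simp [twoSums, threeSums, PySem.Dict.keys, PySem.Dict.getD, PySem.Dict.get?, PySem.Dict.empty]
  have h := bLoop nums [] PySem.Dict.empty PySem.Dict.empty PySem.Dict.empty hinit
  rw [List.nil_append] at h
  obtain ⟨-, -, nT, -, -, cT, -, -, kT⟩ := h
  show (nums.foldl bStepFn (PySem.Dict.empty, PySem.Dict.empty, PySem.Dict.empty)).2.2.items.foldl
      (fun answer (q : Int × Int) => if isPrimeB q.1 then answer + q.2 else answer) 0
    = ((threeSums nums).countP isPrimeB : Int)
  set T := (nums.foldl bStepFn (PySem.Dict.empty, PySem.Dict.empty, PySem.Dict.empty)).2.2 with hT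
  rw [PySem.Dict.items_eq_map_keys T nT 0, List.foldl_map]
  have hcong : T.keys.foldl (fun a k => if isPrimeB k then a + T.getD k 0 else a) 0
      = T.keys.foldl (fun a k => if isPrimeB k then a + ((threeSums nums).count k : Int) else a) 0 := by
    apply PySem.List.foldl_congr_mem
    intro acc k hk
    rw [cT k]
  rw [hcong, sumKeys T.keys (threeSums nums) isPrimeB 0 nT (fun v hv => (kT v).mpr hv)]
  ring

-- ===== VERDICT (by name: the statement is the Claim_ definition above) =====
theorem solution_spec : Claim_equal_solution := by
  unfold Claim_equal_solution Spec_solution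
  intro nums _ hpre
  rw [solution_eq_countP, solution_alt_eq_countP]
  congr 1
  apply List.countP_congr
  intro s hs
  obtain ⟨h0, h1⟩ := hpre s hs
  rw [bridge s h0 h1]
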